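-- pv_equiv track=rewrite | github.com/samarth1612/VLIW-Architecture | Parser.py | checkRAW
-- ===== SOURCE A (Python) =====
-- def checkRAW(packet, inst):
--     """
--     Checks the RAW data dependencies in the given packet of instructions
--
--     Input:
--     - packet: Instruction packet for dependency check
--     - inst: Next upcoming instruction
--
--     Output:
--     - True if there is a RAW data dependency
--     - False if there is no RAW data dependency
--
--     """
--     if inst[0] == "00100":
--
--         op_1 = inst[3]
--         op_2 = inst[4]
--     else:
--         op_1 = inst[2]
--         op_2 = inst[3]
--
--     for y in packet.values():
--         if not y:
--             continue
--         if y[0] == "00100":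
--             if y[1] in [op_1, op_2] or y[2] in [op_1, op_2]:
--                 return True
--         else:
--             if y[1] in [op_1, op_2]:
--                 return True
--     return False
-- ===== SOURCE B (Python) =====
-- def checkRAW(packet, inst):
--     if inst[0] == "00100":
--         ops = sorted([inst[3], inst[4]])
--     else:
--         ops = sorted([inst[2], inst[3]])
--     dests = sorted(
--         reg
--         for y in packet.values() if y
--         for reg in ([y[1], y[2]] if y[0] == "00100" else [y[1]])
--     )
--     i = j = 0
--     while i < len(dests) and j < len(ops):
--         if dests[i] == ops[j]:
--             return True
--         if dests[i] < ops[j]: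
--             i += 1
--         else:
--             j += 1
--     return False
-- ===== Notes on version B (the rewrite author's own statement) =====
-- stated objective: alternative
-- what changed: B flattens the packet's destination registers into a list, sorts it and the two source operands, and decides the dependency with a two-pointer merge intersection, instead of A's per-instruction collision scan with early return.
import Mathlib
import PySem

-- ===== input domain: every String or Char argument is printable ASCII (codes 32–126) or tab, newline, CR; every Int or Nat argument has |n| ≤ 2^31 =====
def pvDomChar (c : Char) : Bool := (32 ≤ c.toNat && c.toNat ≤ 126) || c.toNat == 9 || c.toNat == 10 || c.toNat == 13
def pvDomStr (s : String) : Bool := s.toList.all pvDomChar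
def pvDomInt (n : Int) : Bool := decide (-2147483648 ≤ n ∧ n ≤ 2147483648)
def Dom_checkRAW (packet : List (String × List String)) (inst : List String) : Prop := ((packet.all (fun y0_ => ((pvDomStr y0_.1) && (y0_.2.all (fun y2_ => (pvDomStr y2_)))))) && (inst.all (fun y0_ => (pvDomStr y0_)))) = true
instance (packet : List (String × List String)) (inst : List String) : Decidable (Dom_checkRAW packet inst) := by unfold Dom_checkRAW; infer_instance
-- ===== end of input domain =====

-- B sorts the flattened destination-register list and the two source operands and decides the
-- dependency by a two-pointer merge intersection, instead of A's per-instruction collision scan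
-- with early return (objective: alternative).

-- xs[i] under Pre_ (index in range); total form of PySem.List.pyGet?
def pvGetS (xs : List String) (i : Int) : String := (PySem.List.pyGet? xs i).getD ""

-- ===== PORT A =====
-- the 'for y in packet.values(): …' loop with its early returns
def checkRAWLoop (op1 op2 : String) : List (List String) → Bool
  | [] => false
  | y :: rest =>
    if y = [] then checkRAWLoop op1 op2 rest
    else if pvGetS y 0 = "00100" then
      if (pvGetS y 1 = op1 ∨ pvGetS y 1 = op2) ∨ (pvGetS y 2 = op1 ∨ pvGetS y 2 = op2) then true
      else checkRAWLoop op1 op2 rest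
    else
      if pvGetS y 1 = op1 ∨ pvGetS y 1 = op2 then true
      else checkRAWLoop op1 op2 rest

def checkRAW (packet : List (String × List String)) (inst : List String) : Bool :=
  let op1 := if pvGetS inst 0 = "00100" then pvGetS inst 3 else pvGetS inst 2
  let op2 := if pvGetS inst 0 = "00100" then pvGetS inst 4 else pvGetS inst 3
  checkRAWLoop op1 op2 (packet.map Prod.snd)  -- packet.values() (d.values IS d.items.map (·.2))

-- ===== PORT B =====
-- the generator expression: destination registers of every non-empty packet instruction
def destRegs (ys : List (List String)) : List String :=
  ys.flatMap (fun y =>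
    if y = [] then []
    else if pvGetS y 0 = "00100" then [pvGetS y 1, pvGetS y 2] else [pvGetS y 1])

-- the 'while i < len(dests) and j < len(ops)' two-pointer loop
-- (the index pointers i, j become the remaining suffixes of the two sorted lists)
def mergeHit : List String → List String → Bool
  | [], _ => false
  | _ :: _, [] => false
  | d :: ds, o :: os =>
    if d = o then true
    else if d < o then mergeHit ds (o :: os)
    else mergeHit (d :: ds) os

def checkRAW_alt (packet : List (String × List String)) (inst : List String) : Bool :=
  let ops :=
    if pvGetS inst 0 = "00100" then
      PySem.List.sorted [pvGetS inst 3, pvGetS inst 4] (fun x => x) false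
    else
      PySem.List.sorted [pvGetS inst 2, pvGetS inst 3] (fun x => x) false
  let dests := PySem.List.sorted (destRegs (packet.map Prod.snd)) (fun x => x) false
  mergeHit dests ops

-- ===== PRECONDITION & SPEC =====
-- Pre_ excludes the inputs on which the Python raises IndexError: inst too short for its opcode,
-- or some non-empty packet instruction too short for its opcode (B reads all destination fields
-- before answering, so a malformed entry after A's early True return would make B raise where A
-- returns — see cites).
def Pre_checkRAW (packet : List (String × List String)) (inst : List String) : Prop :=
  inst ≠ [] ∧
  (if inst.headD "" = "00100" then 5 ≤ inst.length else 4 ≤ inst.length) ∧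
  ∀ p ∈ packet, p.2 ≠ [] →
    (if p.2.headD "" = "00100" then 3 ≤ p.2.length else 2 ≤ p.2.length)
instance (packet : List (String × List String)) (inst : List String) : Decidable (Pre_checkRAW packet inst) := by unfold Pre_checkRAW; infer_instance

def pvWitness_checkRAW : (List (String × List String)) × List String :=
  ([("a", ["00000", "r1"])], ["00000", "x", "r1", "r2"])

def Spec_checkRAW (packet : List (String × List String)) (inst : List String) (out : Bool) : Prop := out = checkRAW_alt packet inst
instance (packet : List (String × List String)) (inst : List String) (out : Bool) : Decidable (Spec_checkRAW packet inst out) := by unfold Spec_checkRAW; infer_instance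

-- ===== CLAIM (what is proved, stated in full; the proofs are below) =====
def Claim_equal_checkRAW : Prop := ∀ (packet : List (String × List String)) (inst : List String), Dom_checkRAW packet inst → Pre_checkRAW packet inst → Spec_checkRAW packet inst (checkRAW packet inst)

-- ===== LEMMAS AND PROOFS =====

-- A's loop answers: some non-empty instruction's destination hits op1 or op2
theorem checkRAWLoop_eq_true_iff (op1 op2 : String) (ys : List (List String)) :
    checkRAWLoop op1 op2 ys = true ↔
      ∃ y ∈ ys, y ≠ [] ∧
        (if pvGetS y 0 = "00100" then
            (pvGetS y 1 = op1 ∨ pvGetS y 1 = op2) ∨ (pvGetS y 2 = op1 ∨ pvGetS y 2 = op2)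
         else (pvGetS y 1 = op1 ∨ pvGetS y 1 = op2)) := by
  induction ys with
  | nil => simp [checkRAWLoop]
  | cons y rest ih =>
    by_cases hy : y = []
    · simp [checkRAWLoop, hy, ih]
    · rw [checkRAWLoop]
      by_cases h0 : pvGetS y 0 = "00100" <;>
        simp only [hy, h0, if_true, if_false] <;>
        split_ifs with hhit <;>
        simp [ih, hy, h0, hhit]

-- membership in B's flattened destination list
theorem mem_destRegs (ys : List (List String)) (x : String) :
    x ∈ destRegs ys ↔
      ∃ y ∈ ys, y ≠ [] ∧ (x = pvGetS y 1 ∨ (pvGetS y 0 = "00100" ∧ x = pvGetS y 2)) := by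
  simp only [destRegs, List.mem_flatMap]
  constructor
  · rintro ⟨y, hmem, hx⟩
    by_cases hy : y = []
    · simp [hy] at hx
    · by_cases h0 : pvGetS y 0 = "00100" <;> simp [hy, h0] at hx <;>
        exact ⟨y, hmem, hy, by tauto⟩
  · rintro ⟨y, hmem, hy, hx⟩
    refine ⟨y, hmem, ?_⟩
    by_cases h0 : pvGetS y 0 = "00100" <;> simp [hy, h0] <;> tauto

-- correctness of the two-pointer merge on sorted lists: it finds a common element iff one exists
theorem mergeHit_eq_true_iff (ds os : List String)
    (hds : ds.Pairwise (· ≤ ·)) (hos : os.Pairwise (· ≤ ·)) :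
    mergeHit ds os = true ↔ ∃ x, x ∈ ds ∧ x ∈ os := by
  induction ds generalizing os with
  | nil => simp [mergeHit]
  | cons d ds ihd =>
    induction os with
    | nil => simp [mergeHit]
    | cons o os iho =>
      have hds' : ds.Pairwise (· ≤ ·) := hds.tail
      have hos' : os.Pairwise (· ≤ ·) := hos.tail
      rw [mergeHit]
      by_cases heq : d = o
      · simp only [heq, if_true]
        constructor
        · intro _; exact ⟨o, by simp, by simp⟩
        · intro _; trivial
      · by_cases hlt : d < o
        · -- d < o : d cannot occur in o :: os (all its elements are ≥ o)
          simp only [heq, hlt, if_false, if_true]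
          rw [ihd _ hds' hos]
          constructor
          · rintro ⟨x, hx1, hx2⟩; exact ⟨x, List.mem_cons_of_mem _ hx1, hx2⟩
          · rintro ⟨x, hx1, hx2⟩
            rcases List.mem_cons.mp hx1 with rfl | hx1'
            · rcases List.mem_cons.mp hx2 with rfl | hx2'
              · exact absurd rfl heq
              · have : o ≤ x := (List.pairwise_cons.mp hos).1 x hx2'
                exact absurd (lt_of_lt_of_le hlt this) (lt_irrefl x)
            · exact ⟨x, hx1', hx2⟩
        · -- o < d : o cannot occur in d :: ds (all its elements are ≥ d)
          have hod : o < d := lt_of_le_of_ne (le_of_not_gt hlt) (fun h => heq h.symm)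
          simp only [heq, hlt, if_false]
          rw [iho hos']
          constructor
          · rintro ⟨x, hx1, hx2⟩; exact ⟨x, hx1, List.mem_cons_of_mem _ hx2⟩
          · rintro ⟨x, hx1, hx2⟩
            rcases List.mem_cons.mp hx2 with rfl | hx2'
            · rcases List.mem_cons.mp hx1 with rfl | hx1'
              · exact absurd rfl heq
              · have : x ≤ x := le_refl x
                have hdx : d ≤ x := (List.pairwise_cons.mp hds).1 x hx1'
                exact absurd (lt_of_lt_of_le hod hdx) (lt_irrefl x)
            · exact ⟨x, hx1, hx2'⟩

-- A's per-instruction hit condition = 'some destination of y equals op1 or op2'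
theorem hit_iff (op1 op2 : String) (y : List String) :
    (if pvGetS y 0 = "00100" then
        (pvGetS y 1 = op1 ∨ pvGetS y 1 = op2) ∨ (pvGetS y 2 = op1 ∨ pvGetS y 2 = op2)
     else (pvGetS y 1 = op1 ∨ pvGetS y 1 = op2)) ↔
    (∃ x, (x = pvGetS y 1 ∨ (pvGetS y 0 = "00100" ∧ x = pvGetS y 2)) ∧ (x = op1 ∨ x = op2)) := by
  by_cases h0 : pvGetS y 0 = "00100" <;> simp [h0]

-- A's loop on any ys equals B's sort-and-merge on the same ys and operands
theorem raw_core (op1 op2 : String) (ys : List (List String)) :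
    checkRAWLoop op1 op2 ys =
      mergeHit (PySem.List.sorted (destRegs ys) (fun x => x) false)
        (PySem.List.sorted [op1, op2] (fun x => x) false) := by
  have hd : (PySem.List.sorted (destRegs ys) (fun x => x) false).Pairwise (· ≤ ·) :=
    PySem.List.sorted_pairwise _ _
  have ho : (PySem.List.sorted [op1, op2] (fun x => x) false).Pairwise (· ≤ ·) :=
    PySem.List.sorted_pairwise _ _
  apply Bool.eq_iff_iff.mpr
  rw [mergeHit_eq_true_iff _ _ hd ho, checkRAWLoop_eq_true_iff]
  simp only [PySem.List.mem_sorted, mem_destRegs, List.mem_cons,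
    List.not_mem_nil, or_false]
  constructor
  · rintro ⟨y, hmem, hne, hhit⟩
    rcases (hit_iff op1 op2 y).mp hhit with ⟨x, hw, hop⟩
    exact ⟨x, ⟨y, hmem, hne, hw⟩, hop⟩
  · rintro ⟨x, ⟨y, hmem, hne, hw⟩, hop⟩
    exact ⟨y, hmem, hne, (hit_iff op1 op2 y).mpr ⟨x, hw, hop⟩⟩

-- ===== VERDICT (by name: the statement is the Claim_ definition above) =====
theorem checkRAW_spec : Claim_equal_checkRAW := by
  intro packet inst _dom _pre
  show checkRAW packet inst = checkRAW_alt packet inst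
  unfold checkRAW checkRAW_alt
  by_cases h0 : pvGetS inst 0 = "00100" <;> simp only [h0, if_true, if_false] <;>
    exact raw_core _ _ _
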